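-- pv_equiv track=rewrite | github.com/cfug/dart.cn | fix_translation_final.py | merge_frontmatter
-- ===== SOURCE A (Python) =====
-- def merge_frontmatter(en_fm, cn_fm):
--     """合并 frontmatter - 保留英文结构，仅对 title/description 添加中文"""
--     translatable = {'title', 'description', 'short-title', 'shortTitle'}
--
--     # 解析中文 frontmatter
--     cn_dict = {}
--     for line in cn_fm.split('\n'):
--         if line.startswith('#') or not ':' in line:
--             continue
--         if not line.startswith(' ') and not line.startswith('\t'):
--             parts = line.split(':', 1)
--             key = parts[0].strip()
--             val = parts[1].strip() if len(parts) > 1 else ''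
--             if val and val != '>':
--                 cn_dict[key] = val
--
--     # 处理英文 frontmatter
--     result = ['---']
--     en_lines = en_fm.split('\n')
--     i = 0
--
--     while i < len(en_lines):
--         line = en_lines[i]
--
--         if not line.strip():
--             result.append(line)
--             i += 1
--             continue
--
--         # 检查是否是键值对
--         if ':' in line and not line.startswith(' ') and not line.startswith('\t'):
--             key = line.split(':')[0].strip()
--
--             # 收集完整的多行值
--             full_lines = [line]
--             j = i + 1
--             while j < len(en_lines) and (en_lines[j].startswith('  ') or en_lines[j].startswith('\t')):
--                 full_lines.append(en_lines[j])
--                 j += 1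
--
--             # 可翻译字段特殊处理
--             if key in translatable:
--                 # 添加英文注释
--                 for fl in full_lines:
--                     result.append(f'# {fl}')
--                 # 添加翻译值（目前保持英文，因为原翻译没有这些）
--                 for fl in full_lines:
--                     result.append(fl)
--             else:
--                 # 非翻译字段直接保留
--                 for fl in full_lines:
--                     result.append(fl)
--
--             i = j
--         else:
--             result.append(line)
--             i += 1
--
--     result.append('---')
--     return '\n'.join(result)
-- ===== SOURCE B (Python) =====
-- def merge_frontmatter(en_fm, cn_fm):
--     """Single forward pass with an explicit block buffer (cn_fm never affects the result)."""
--     translatable = {'title', 'description', 'short-title', 'shortTitle'}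
--
--     out = ['---']
--     buf = []
--
--     def flush():
--         if buf:
--             key = buf[0].split(':')[0].strip()
--             if key in translatable:
--                 out.extend('# ' + fl for fl in buf)
--             out.extend(buf)
--             buf.clear()
--
--     for line in en_fm.split('\n'):
--         if buf and (line.startswith('  ') or line.startswith('\t')):
--             buf.append(line)
--             continue
--         flush()
--         if line.strip() and ':' in line and not line.startswith(' ') and not line.startswith('\t'):
--             buf.append(line)
--         else:
--             out.append(line)
--     flush()
--     out.append('---')
--     return '\n'.join(out)
-- ===== Notes on version B (the rewrite author's own statement) =====
-- stated objective: simpler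
-- what changed: Replaces A's index-jump outer while with a nested continuation-collecting inner while by a single forward pass over en_lines that maintains an explicit block buffer flushed at block boundaries and EOF, and drops the cn_fm dict-parsing loop whose result A never uses.
import Mathlib
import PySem

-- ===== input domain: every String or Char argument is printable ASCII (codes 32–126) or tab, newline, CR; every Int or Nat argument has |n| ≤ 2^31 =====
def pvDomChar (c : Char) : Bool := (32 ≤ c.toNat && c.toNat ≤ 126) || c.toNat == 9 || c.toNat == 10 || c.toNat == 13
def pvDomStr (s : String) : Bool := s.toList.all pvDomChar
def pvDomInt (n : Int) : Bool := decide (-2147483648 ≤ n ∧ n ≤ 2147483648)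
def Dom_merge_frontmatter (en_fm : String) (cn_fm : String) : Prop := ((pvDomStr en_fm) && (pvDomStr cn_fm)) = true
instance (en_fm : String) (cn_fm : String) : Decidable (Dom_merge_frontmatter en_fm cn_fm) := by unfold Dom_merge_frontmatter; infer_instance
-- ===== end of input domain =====

-- B replaces A's index-jump outer/inner while over en_lines by a single forward pass with an
-- explicit block buffer (simpler decomposition); the result is byte-identical.

-- ===== PORT A =====
-- A's translatable set {'title','description','short-title','shortTitle'}
def aTranslatable (key : List Char) : Bool :=
  key ∈ ["title".toList, "description".toList, "short-title".toList, "shortTitle".toList]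

-- A's cn_fm parsing loop (the dict is built but never used by A; kept for fidelity)
def aParseCn (cn_fm : String) : PySem.Dict (List Char) (List Char) :=
  (PySem.Chars.splitOn cn_fm.toList ['\n']).foldl (fun d line =>
    if PySem.Chars.startswith line ['#'] || !PySem.Chars.isIn [':'] line then d
    else if !PySem.Chars.startswith line [' '] && !PySem.Chars.startswith line ['\t'] then
      let parts := PySem.Chars.splitOnMax line [':'] 1
      let key := PySem.Chars.strip parts.headI
      let val := if parts.length > 1 then PySem.Chars.strip (parts.getD 1 []) else []
      if val ≠ [] && val ≠ ['>'] then d.insert key val else d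
    else d) PySem.Dict.empty

-- the inner while's condition: en_lines[j].startswith('  ') or en_lines[j].startswith('\t')
def aIsCont (l : List Char) : Bool :=
  PySem.Chars.startswith l [' ', ' '] || PySem.Chars.startswith l ['\t']

-- A's outer while loop over en_lines, acc = result so far
def aLoop (acc : List (List Char)) : List (List Char) → List (List Char)
  | [] => acc
  | l :: ls =>
    if PySem.Chars.strip l = [] then aLoop (acc ++ [l]) ls
    else if PySem.Chars.isIn [':'] l && !PySem.Chars.startswith l [' ']
            && !PySem.Chars.startswith l ['\t'] then
      let key := PySem.Chars.strip (PySem.Chars.splitOn l [':']).headI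
      let full := l :: ls.takeWhile aIsCont
      let rest := ls.dropWhile aIsCont
      if aTranslatable key then
        aLoop (acc ++ full.map (fun fl => '#' :: ' ' :: fl) ++ full) rest
      else
        aLoop (acc ++ full) rest
    else aLoop (acc ++ [l]) ls
  termination_by ls => ls.length
  decreasing_by
  · simp
  · have := List.length_dropWhile_le aIsCont ls; simp; omega
  · have := List.length_dropWhile_le aIsCont ls; simp; omega
  · simp

def merge_frontmatter (en_fm : String) (cn_fm : String) : String :=
  let _cn_dict := aParseCn cn_fm
  let en_lines := PySem.Chars.splitOn en_fm.toList ['\n']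
  String.ofList (PySem.Chars.join ['\n'] (aLoop ["---".toList] en_lines ++ ["---".toList]))

-- ===== PORT B =====
def bTranslatable (key : List Char) : Bool :=
  key ∈ ["title".toList, "description".toList, "short-title".toList, "shortTitle".toList]

-- Source B's flush(): emit the buffered block (commented copy first if its key is translatable)
def bFlush (buf out : List (List Char)) : List (List Char) :=
  if buf = [] then out
  else
    let key := PySem.Chars.strip (PySem.Chars.splitOn buf.headI [':']).headI
    (if bTranslatable key then out ++ buf.map (fun fl => '#' :: ' ' :: fl) else out) ++ buf

def bIsCont (l : List Char) : Bool :=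
  PySem.Chars.startswith l [' ', ' '] || PySem.Chars.startswith l ['\t']

-- Source B's single for-loop, state = (out, buf)
def bLoop (out buf : List (List Char)) : List (List Char) → List (List Char)
  | [] => bFlush buf out
  | l :: ls =>
    if buf ≠ [] && bIsCont l then bLoop out (buf ++ [l]) ls
    else
      let out2 := bFlush buf out
      if PySem.Chars.strip l ≠ [] && PySem.Chars.isIn [':'] l
          && !PySem.Chars.startswith l [' '] && !PySem.Chars.startswith l ['\t'] then
        bLoop out2 [l] ls
      else bLoop (out2 ++ [l]) [] ls

def merge_frontmatter_alt (en_fm : String) (cn_fm : String) : String :=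
  let en_lines := PySem.Chars.splitOn en_fm.toList ['\n']
  String.ofList (PySem.Chars.join ['\n'] (bLoop ["---".toList] [] en_lines ++ ["---".toList]))

-- ===== PRECONDITION & SPEC =====
def Spec_merge_frontmatter (en_fm : String) (cn_fm : String) (out : String) : Prop := out = merge_frontmatter_alt en_fm cn_fm
instance (en_fm : String) (cn_fm : String) (out : String) : Decidable (Spec_merge_frontmatter en_fm cn_fm out) := by unfold Spec_merge_frontmatter; infer_instance

-- ===== CLAIM (what is proved, stated in full; the proofs are below) =====
def Claim_equal_merge_frontmatter : Prop := ∀ (en_fm : String) (cn_fm : String), Dom_merge_frontmatter en_fm cn_fm → Spec_merge_frontmatter en_fm cn_fm (merge_frontmatter en_fm cn_fm)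

-- ===== LEMMAS AND PROOFS =====

theorem bFlush_nil (out : List (List Char)) : bFlush [] out = out := by simp [bFlush]

-- running bLoop with a nonempty buffer absorbs the continuation prefix then flushes
theorem bLoop_buf (ls : List (List Char)) : ∀ out buf, buf ≠ [] →
    bLoop out buf ls = bLoop (bFlush (buf ++ ls.takeWhile bIsCont) out) [] (ls.dropWhile bIsCont) := by
  induction ls with
  | nil => intro out buf h; simp [bLoop, bFlush_nil]
  | cons l ls ih =>
    intro out buf h
    by_cases hc : bIsCont l = true
    · rw [bLoop, if_pos (by simp [h, hc])]
      rw [ih out (buf ++ [l]) (by simp)]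
      simp [hc]
    · rw [bLoop, if_neg (by simp [hc])]
      rw [show (l :: ls).takeWhile bIsCont = [] from by simp [hc]]
      rw [show (l :: ls).dropWhile bIsCont = l :: ls from by simp [hc]]
      conv_rhs => rw [bLoop]
      simp [hc, bFlush_nil]

theorem bFlush_cons (l : List Char) (cs out : List (List Char)) :
    bFlush (l :: cs) out =
      if aTranslatable (PySem.Chars.strip (PySem.Chars.splitOn l [':']).headI) then
        out ++ (l :: cs).map (fun fl => '#' :: ' ' :: fl) ++ (l :: cs)
      else out ++ (l :: cs) := by
  simp only [bFlush, bTranslatable, aTranslatable, List.headI]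
  split_ifs with h1 h2 <;> simp_all [List.append_assoc]

theorem bLoop_eq_aLoop : ∀ n ls out, ls.length ≤ n → bLoop out [] ls = aLoop out ls := by
  intro n
  induction n with
  | zero =>
    intro ls out h
    have : ls = [] := by cases ls <;> simp_all
    subst this; simp [bLoop, aLoop, bFlush_nil]
  | succ n ih =>
    intro ls out h
    cases ls with
    | nil => simp [bLoop, aLoop, bFlush_nil]
    | cons l ls =>
      rw [bLoop, if_neg (by simp), bFlush_nil]
      by_cases hs : PySem.Chars.strip l = []
      · rw [aLoop, if_pos hs]
        rw [if_neg (by simp [hs])]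
        exact ih ls (out ++ [l]) (by simpa using Nat.lt_succ_iff.mp (by simpa using h))
      · by_cases hk : (PySem.Chars.isIn [':'] l && !PySem.Chars.startswith l [' ']
            && !PySem.Chars.startswith l ['\t']) = true
        · rw [if_pos (by simp_all)]
          rw [aLoop, if_neg hs, if_pos hk]
          rw [bLoop_buf ls out [l] (by simp), List.singleton_append]
          rw [ih (ls.dropWhile bIsCont) _ (by
            have := List.length_dropWhile_le bIsCont ls
            simp at h; omega)]
          rw [show bIsCont = aIsCont from rfl, bFlush_cons]
          split_ifs with ht <;> simp [ht]
        · rw [if_neg (by simp_all)]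
          rw [aLoop, if_neg hs, if_neg hk]
          exact ih ls (out ++ [l]) (by simpa using Nat.lt_succ_iff.mp (by simpa using h))

-- ===== VERDICT (by name: the statement is the Claim_ definition above) =====
theorem merge_frontmatter_spec : Claim_equal_merge_frontmatter := by
  intro en_fm cn_fm _
  unfold Spec_merge_frontmatter
  simp only [merge_frontmatter, merge_frontmatter_alt]
  rw [bLoop_eq_aLoop (PySem.Chars.splitOn en_fm.toList ['\n']).length _ _ (le_refl _)]
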